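-- pv_equiv track=rewrite | github.com/Shikhar03Stark/Code-Dump | ETC/misc/demo.py | helper
-- ===== SOURCE A (Python) =====
-- def helper(s):
--     ans = 0
--     n = len(s)
--     cont = 1
--     for i in range(1,n):
--         if s[i] == s[i-1]:
--             cont += 1
--         else:
--             ans += cont//2
--             cont = 1
--
--     ans += cont//2
--     return ans
-- ===== SOURCE B (Python) =====
-- def helper(s):
--     ans = 0
--     i = 1
--     while i < len(s):
--         if s[i] == s[i - 1]:
--             ans += 1
--             i += 2
--         else:
--             i += 1
--     return ans
-- ===== Notes on version B (the rewrite author's own statement) =====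
-- stated objective: alternative
-- what changed: Replaces run-length tracking plus integer division per run with a greedy pairing scan: an index steps by 2 past each adjacent equal pair (counting it) and by 1 otherwise, so no run counter or division is ever computed.
import Mathlib
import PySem

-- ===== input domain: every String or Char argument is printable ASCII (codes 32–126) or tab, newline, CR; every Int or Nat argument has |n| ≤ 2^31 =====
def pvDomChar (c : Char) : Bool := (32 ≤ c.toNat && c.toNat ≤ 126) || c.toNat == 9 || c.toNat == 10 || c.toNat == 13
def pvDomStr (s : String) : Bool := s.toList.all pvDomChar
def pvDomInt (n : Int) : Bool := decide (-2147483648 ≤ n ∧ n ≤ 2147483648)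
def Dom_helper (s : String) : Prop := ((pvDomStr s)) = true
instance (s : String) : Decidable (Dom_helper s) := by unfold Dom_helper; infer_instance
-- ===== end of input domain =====

-- B replaces A's run-length counter and integer division with a greedy adjacent-pair
-- scan that steps the index by 2 past each counted pair (objective: alternative).


-- ===== PORT A =====
-- A's loop over i in range(1, n) compares s[i] with s[i-1]; ported as a structural
-- recursion over the character list carrying the previous character and the same
-- state (ans, cont), branches in the same order; 'cont // 2' is PySem.Int.floordiv.
def helperGoA (prev : Char) (ans cont : Int) : List Char → Int
  | [] => ans + PySem.Int.floordiv cont 2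
  | c :: rest =>
    if c == prev then helperGoA c ans (cont + 1) rest
    else helperGoA c (ans + PySem.Int.floordiv cont 2) 1 rest

def helper (s : String) : Int :=
  match s.toList with
  | [] => 0 + PySem.Int.floordiv 1 2
  | c :: rest => helperGoA c 0 1 rest

-- ===== PORT B =====
-- B's while-loop with index i; both accesses are in range whenever taken, so the
-- getD default is never used (exact on that account).
def helperGoB (cs : List Char) (i : Nat) (ans : Int) : Int :=
  if _h : i < cs.length then
    if cs.getD i ' ' == cs.getD (i - 1) ' ' then helperGoB cs (i + 2) (ans + 1)
    else helperGoB cs (i + 1) ans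
  else ans
termination_by cs.length - i

def helper_alt (s : String) : Int := helperGoB s.toList 1 0

-- ===== PRECONDITION & SPEC =====
def Spec_helper (s : String) (out : Int) : Prop := out = helper_alt s
instance (s : String) (out : Int) : Decidable (Spec_helper s out) := by unfold Spec_helper; infer_instance

-- ===== CLAIM (what is proved, stated in full; the proofs are below) =====
def Claim_equal_helper : Prop := ∀ (s : String), Dom_helper s → Spec_helper s (helper s)

-- ===== LEMMAS AND PROOFS =====

-- reference: pairs counted by greedy left-to-right adjacent matching
def pairsP : List Char → Int
  | [] => 0
  | [_] => 0
  | a :: b :: t => if a == b then 1 + pairsP t else pairsP (b :: t)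

theorem pairsP_short (l : List Char) (h : l.length ≤ 1) : pairsP l = 0 := by
  match l with
  | [] => rfl
  | [_] => rfl
  | a :: b :: t => simp at h

theorem fdiv_two (x : Int) : Int.fdiv x 2 = x / 2 := by
  rw [Int.fdiv_eq_ediv]; simp

theorem floordiv_succ (c : Int) :
    PySem.Int.floordiv (c + 1) 2 =
      PySem.Int.floordiv c 2 + (if c % 2 = 1 then 1 else 0) := by
  simp only [PySem.Int.floordiv, fdiv_two]
  by_cases hp : c % 2 = 1 <;> simp [hp] <;> omega

theorem goA_eq (cs : List Char) : ∀ (prev : Char) (ans cont : Int),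
    helperGoA prev ans cont cs =
      ans + PySem.Int.floordiv cont 2 +
        (if cont % 2 = 1 then pairsP (prev :: cs) else pairsP cs) := by
  induction cs with
  | nil =>
    intro prev ans cont
    simp [helperGoA, pairsP]
  | cons c t ih =>
    intro prev ans cont
    rw [helperGoA]
    by_cases hc : c = prev
    · subst hc
      rw [if_pos (by simp), ih, floordiv_succ]
      by_cases hp : cont % 2 = 1
      · have hp2 : ¬((cont + 1) % 2 = 1) := by omega
        have hpp : pairsP (c :: c :: t) = 1 + pairsP t := by simp [pairsP]
        rw [if_neg hp2, if_pos hp, if_pos hp, hpp]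
        ring
      · have hp2 : (cont + 1) % 2 = 1 := by omega
        rw [if_pos hp2, if_neg hp, if_neg hp]
        ring
    · rw [if_neg (by simp [hc]), ih]
      have hpp : pairsP (prev :: c :: t) = pairsP (c :: t) := by
        have hne : (prev == c) = false := by simp [Ne.symm hc]
        simp [pairsP, hne]
      have h12 : PySem.Int.floordiv 1 2 = 0 := by decide
      have h1 : ((1 : Int) % 2 = 1) := by decide
      rw [if_pos h1, h12, hpp, ite_self]
      ring

theorem goB_eq (cs : List Char) : ∀ (i : Nat) (ans : Int), 1 ≤ i →
    helperGoB cs i ans = ans + pairsP (cs.drop (i - 1)) := by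
  have H : ∀ (k i : Nat) (ans : Int), cs.length - i ≤ k → 1 ≤ i →
      helperGoB cs i ans = ans + pairsP (cs.drop (i - 1)) := by
    intro k
    induction k with
    | zero =>
      intro i ans hk hi
      have hge : cs.length ≤ i := by omega
      rw [helperGoB, dif_neg (by omega), pairsP_short _ (by simp; omega)]
      ring
    | succ k ih =>
      intro i ans hk hi
      rw [helperGoB]
      by_cases h : i < cs.length
      · have hi1 : i - 1 < cs.length := by omega
        have hd1 : cs.drop (i - 1) = cs[i - 1] :: cs.drop (i - 1 + 1) :=
          List.drop_eq_getElem_cons hi1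
        have hii : i - 1 + 1 = i := by omega
        have hd2 : cs.drop i = cs[i] :: cs.drop (i + 1) := List.drop_eq_getElem_cons h
        have hdrop : cs.drop (i - 1) = cs[i - 1] :: cs[i] :: cs.drop (i + 1) := by
          rw [hd1, hii, hd2]
        have hg1 : cs.getD i ' ' = cs[i] := List.getD_eq_getElem cs ' ' h
        have hg2 : cs.getD (i - 1) ' ' = cs[i - 1] := List.getD_eq_getElem cs ' ' hi1
        rw [dif_pos h, hg1, hg2, hdrop]
        by_cases he : cs[i] = cs[i - 1]
        · have hbe : (cs[i] == cs[i - 1]) = true := by simp [he]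
          have hbe2 : (cs[i - 1] == cs[i]) = true := by simp [he.symm]
          rw [if_pos hbe, ih (i + 2) (ans + 1) (by omega) (by omega)]
          have hdd : cs.drop (i + 2 - 1) = cs.drop (i + 1) := by norm_num
          rw [hdd]
          simp only [pairsP, hbe2, if_true]
          ring
        · have hbe : (cs[i] == cs[i - 1]) = false := by simp [he]
          have hbe2 : (cs[i - 1] == cs[i]) = false := by simp [Ne.symm he]
          rw [if_neg (by simp [hbe]), ih (i + 1) ans (by omega) (by omega)]
          have hdd : cs.drop (i + 1 - 1) = cs.drop i := by norm_num
          rw [hdd, hd2]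
          simp [pairsP, hbe2]
      · rw [dif_neg h, pairsP_short _ (by simp; omega)]
        ring
  intro i ans hi
  exact H (cs.length - i) i ans le_rfl hi

-- ===== VERDICT (by name: the statement is the Claim_ definition above) =====
theorem helper_spec : Claim_equal_helper := by
  intro s _
  unfold Spec_helper helper helper_alt
  rw [goB_eq s.toList 1 0 le_rfl]
  cases hcs : s.toList with
  | nil => decide
  | cons c rest =>
    show helperGoA c 0 1 rest = 0 + pairsP (List.drop 0 (c :: rest))
    rw [goA_eq, List.drop_zero]
    have h12 : PySem.Int.floordiv 1 2 = 0 := by decide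
    have h1 : ((1 : Int) % 2 = 1) := by decide
    rw [if_pos h1, h12]
    ring
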